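-- pv_equiv track=rewrite | github.com/jv503679/SE | Final/server.py | search_user_name
-- ===== SOURCE A (Python) =====
-- def search_user_name(message):
--         username = ""
--         for c in message:
--                 if c == " ":
--                         break;
--                 if c != "@":
--                         username += c
--         return username
-- ===== SOURCE B (Python) =====
-- def search_user_name(message):
--     return message.split(" ", 1)[0].replace("@", "")
-- ===== Notes on version B (the rewrite author's own statement) =====
-- stated objective: idiomatic
-- what changed: Replaces the explicit per-character loop with break and skip by split-at-first-space followed by replace, removing the string-builder accumulator.
import Mathlib
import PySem

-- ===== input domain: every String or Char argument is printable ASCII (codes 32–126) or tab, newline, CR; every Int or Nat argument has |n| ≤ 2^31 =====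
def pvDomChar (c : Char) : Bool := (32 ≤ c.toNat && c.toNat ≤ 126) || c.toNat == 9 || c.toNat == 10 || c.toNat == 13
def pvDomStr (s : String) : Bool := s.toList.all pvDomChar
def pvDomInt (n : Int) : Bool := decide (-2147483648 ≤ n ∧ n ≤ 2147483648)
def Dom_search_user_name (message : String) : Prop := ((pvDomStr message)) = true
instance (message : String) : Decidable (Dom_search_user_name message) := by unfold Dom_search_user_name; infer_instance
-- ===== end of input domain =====

-- B replaces A's per-character loop (break at space, skip '@') by split-at-first-space then replace('@',''); idiomatic, same O(n).

-- ===== PORT A =====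
-- A's loop: accumulate chars, break at first ' ', skip '@'.
def searchLoopA : List Char → String → String
  | [], acc => acc
  | c :: cs, acc =>
    if c = ' ' then acc
    else if c ≠ '@' then searchLoopA cs (acc.push c)
    else searchLoopA cs acc

def search_user_name (message : String) : String :=
  searchLoopA message.toList ""

-- ===== PORT B =====
-- message.split(" ", 1)[0] = prefix before the first space; .replace("@","") = filter out '@'.
def search_user_name_alt (message : String) : String :=
  String.ofList (((message.toList.takeWhile (fun c => c ≠ ' ')).filter (fun c => c ≠ '@')))

-- ===== PRECONDITION & SPEC =====
def Spec_search_user_name (message : String) (out : String) : Prop := out = search_user_name_alt message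
instance (message : String) (out : String) : Decidable (Spec_search_user_name message out) := by unfold Spec_search_user_name; infer_instance

-- ===== CLAIM (what is proved, stated in full; the proofs are below) =====
def Claim_equal_search_user_name : Prop := ∀ (message : String), Dom_search_user_name message → Spec_search_user_name message (search_user_name message)

-- ===== LEMMAS AND PROOFS =====
theorem searchLoopA_eq (l : List Char) : ∀ acc : String,
    searchLoopA l acc = acc ++ String.ofList ((l.takeWhile (fun c => c ≠ ' ')).filter (fun c => c ≠ '@')) := by
  induction l with
  | nil => intro acc; simp [searchLoopA]
  | cons c cs ih =>
    intro acc
    by_cases hs : c = ' '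
    · simp [searchLoopA, hs]
    · by_cases ha : c = '@'
      · simp [searchLoopA, ha, ih]
      · simp only [searchLoopA, if_neg hs, ne_eq, ha, not_false_eq_true, if_pos, ih]
        apply String.ext
        simp [hs, ha]

-- ===== VERDICT (by name: the statement is the Claim_ definition above) =====
theorem search_user_name_spec : Claim_equal_search_user_name := by
  intro message _
  show _ = _
  rw [search_user_name, searchLoopA_eq]
  simp [search_user_name_alt]
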